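-- pv_equiv track=rewrite | github.com/benjaminmarriner/dds-mlr-bridge | code/data_cleaning.py | validate_dashes
-- ===== SOURCE A (Python) =====
-- def validate_dashes(ordered_trick:list[str]) -> int:
--
--     """
--     Returns the number of dashes in the ordered_trick.
--     Assumes ordered_trick contains valid cards and is ordered in the way it was played.
--     Also validates the dashes, ensuring the first card played to a trick is not a dash,
--     that once a dash appears in a trick no card should follow it.
--     Raises a subclass of PlaySequenceError if the dashes are invalid.
--     """
--
--     num_dashes:int = 0
--     for pos,card in enumerate(ordered_trick):
--         if card=="-":
--             if pos==0:
--                 raise FirstCardIsDashError()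
--             num_dashes+=1
--         else:
--             if num_dashes:
--                 raise CardAfterDashError()
--
--     return num_dashes
-- ===== SOURCE B (Python) =====
-- class PlaySequenceError(Exception):
--     pass
--
-- class FirstCardIsDashError(PlaySequenceError):
--     pass
--
-- class CardAfterDashError(PlaySequenceError):
--     pass
--
-- def validate_dashes(ordered_trick:list[str]) -> int:
--     num = ordered_trick.count("-")
--     if num == 0:
--         return 0
--     if ordered_trick[0] == "-":
--         raise FirstCardIsDashError()
--     if ordered_trick[len(ordered_trick)-num:] != ["-"]*num:
--         raise CardAfterDashError()
--     return num
-- ===== Notes on version B (the rewrite author's own statement) =====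
-- stated objective: alternative
-- what changed: B replaces A's single stateful scan (position/flag bookkeeping per element) with an aggregate count plus one slice comparison against ['-']*num to validate that the dashes form a suffix, preserving A's exception order.
import Mathlib
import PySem

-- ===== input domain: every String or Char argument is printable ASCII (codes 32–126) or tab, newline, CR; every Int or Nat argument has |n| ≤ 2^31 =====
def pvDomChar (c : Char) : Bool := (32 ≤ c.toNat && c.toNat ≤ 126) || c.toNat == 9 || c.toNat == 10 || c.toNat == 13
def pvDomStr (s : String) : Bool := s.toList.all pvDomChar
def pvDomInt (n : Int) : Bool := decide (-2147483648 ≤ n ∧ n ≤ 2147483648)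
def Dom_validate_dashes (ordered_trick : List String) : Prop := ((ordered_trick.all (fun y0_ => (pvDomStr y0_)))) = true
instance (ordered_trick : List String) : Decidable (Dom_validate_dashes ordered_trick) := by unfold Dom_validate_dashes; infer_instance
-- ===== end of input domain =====

-- B validates with one aggregate count and a slice comparison instead of A's stateful scan (objective: alternative decomposition, same cost).
-- Both raise on the same inputs (excluded by Pre_); equivalence is about the return value.

-- ===== PORT A =====
-- the for-loop over enumerate(ordered_trick) with accumulator num_dashes; a raise is ported as returning 0 (those inputs lie outside Pre_)
def vdLoopA : List (Int × String) → Int → Int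
  | [], num_dashes => num_dashes
  | (pos, card) :: rest, num_dashes =>
    if card = "-" then
      if pos = 0 then 0  -- raise FirstCardIsDashError()
      else vdLoopA rest (num_dashes + 1)
    else
      if num_dashes ≠ 0 then 0  -- raise CardAfterDashError()
      else vdLoopA rest num_dashes

def validate_dashes (ordered_trick : List String) : Int :=
  vdLoopA (PySem.List.enumerate ordered_trick 0) 0

-- ===== PORT B =====
def validate_dashes_alt (ordered_trick : List String) : Int :=
  let num : Int := (PySem.List.count ordered_trick "-" : Int)
  if num = 0 then 0
  else if PySem.List.pyGet? ordered_trick 0 = some "-" then 0  -- raise FirstCardIsDashError()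
  else if PySem.List.slice ordered_trick (some ((ordered_trick.length : Int) - num)) none ≠ List.replicate num.toNat "-" then 0  -- raise CardAfterDashError()
  else num

-- ===== PRECONDITION & SPEC =====
-- Pre_ excludes exactly the inputs where A raises (FirstCardIsDashError when the first card
-- is "-", CardAfterDashError when a non-dash follows a dash); B raises the same exceptions there.
def Pre_validate_dashes (ordered_trick : List String) : Prop :=
  ordered_trick.head? ≠ some "-" ∧
  (ordered_trick.dropWhile (fun s => s ≠ "-")).all (fun s => s = "-") = true

instance (ordered_trick : List String) : Decidable (Pre_validate_dashes ordered_trick) := by unfold Pre_validate_dashes; infer_instance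

def pvWitness_validate_dashes : List String := (["AS", "KH", "-", "-"])

def Spec_validate_dashes (ordered_trick : List String) (out : Int) : Prop := out = validate_dashes_alt ordered_trick
instance (ordered_trick : List String) (out : Int) : Decidable (Spec_validate_dashes ordered_trick out) := by unfold Spec_validate_dashes; infer_instance

-- ===== CLAIM (what is proved, stated in full; the proofs are below) =====
def Claim_equal_validate_dashes : Prop := ∀ (ordered_trick : List String), Dom_validate_dashes ordered_trick → Pre_validate_dashes ordered_trick → Spec_validate_dashes ordered_trick (validate_dashes ordered_trick)

-- ===== LEMMAS AND PROOFS =====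

-- A's loop, past position 0, returns num_dashes + (#dashes remaining) as long as the
-- suffix invariant holds: no dash yet → remaining dashes form a suffix; dash seen → all remaining are dashes.
lemma vdLoopA_run (t : List String) : ∀ (k n : Int), 1 ≤ k → 0 ≤ n →
    (n = 0 → (t.dropWhile (fun s => s ≠ "-")).all (fun s => s = "-") = true) →
    (n ≠ 0 → t.all (fun s => s = "-") = true) →
    vdLoopA (PySem.List.enumerate t k) n = n + (t.count "-" : Int) := by
  induction t with
  | nil => intro k n _ _ _ _; simp [PySem.List.enumerate, vdLoopA]
  | cons c rest ih =>
    intro k n hk hn h0 h1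
    rw [PySem.List.enumerate_cons]
    by_cases hc : c = "-"
    · subst hc
      have hall : rest.all (fun s => s = "-") = true := by
        by_cases hn0 : n = 0
        · have := h0 hn0
          simpa [List.dropWhile] using this
        · have := h1 hn0
          simpa using this
      have : vdLoopA ((k, "-") :: PySem.List.enumerate rest (k + 1)) n
          = vdLoopA (PySem.List.enumerate rest (k + 1)) (n + 1) := by
        simp [vdLoopA]; omega
      rw [this, ih (k + 1) (n + 1) (by omega) (by omega)
          (by omega) (fun _ => hall)]
      rw [List.count_cons_self]
      push_cast
      ring
    · have hn0 : n = 0 := by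
        by_contra hne
        have := h1 hne
        simp [List.all_cons] at this
        exact hc this.1
      subst hn0
      have : vdLoopA ((k, c) :: PySem.List.enumerate rest (k + 1)) 0
          = vdLoopA (PySem.List.enumerate rest (k + 1)) 0 := by
        simp [vdLoopA, hc]
      rw [this, ih (k + 1) 0 (by omega) le_rfl
          (fun _ => by have := h0 rfl; simpa [List.dropWhile, hc] using this)
          (fun h => absurd rfl h)]
      rw [List.count_cons_of_ne (by simpa using hc)]
    
-- under Pre_, t decomposes as a dash-free prefix followed by exactly (t.count "-") dashes
lemma pre_decomp (t : List String) (hsuf : (t.dropWhile (fun s => s ≠ "-")).all (fun s => s = "-") = true) :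
    t = t.takeWhile (fun s => s ≠ "-") ++ List.replicate (t.count "-") "-" ∧
    (t.takeWhile (fun s => s ≠ "-")).count "-" = 0 := by
  have hsplit := (List.takeWhile_append_dropWhile (p := fun s => decide (s ≠ "-")) (l := t)).symm
  have hdrop : t.dropWhile (fun s => s ≠ "-") = List.replicate (t.dropWhile (fun s => s ≠ "-")).length "-" := by
    apply List.eq_replicate_of_mem
    intro b hb
    have := List.all_eq_true.mp hsuf b hb
    simpa using this
  have htake : (t.takeWhile (fun s => s ≠ "-")).count "-" = 0 := by
    rw [List.count_eq_zero]
    intro hmem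
    have := List.mem_takeWhile_imp hmem
    simp at this
  have hcount : t.count "-" = (t.dropWhile (fun s => s ≠ "-")).length := by
    conv_lhs => rw [hsplit]
    rw [List.count_append, htake, Nat.zero_add]
    conv_lhs => rw [hdrop]
    simp
  refine ⟨?_, htake⟩
  conv_lhs => rw [hsplit]
  rw [hcount, ← hdrop]

-- ===== VERDICT (by name: the statement is the Claim_ definition above) =====
theorem validate_dashes_spec : Claim_equal_validate_dashes := by
  intro t _ hpre
  obtain ⟨hhead, hsuf⟩ := hpre
  unfold Spec_validate_dashes
  -- both sides equal (t.count "-" : Int)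
  have hA : validate_dashes t = (t.count "-" : Int) := by
    unfold validate_dashes
    cases t with
    | nil => simp [PySem.List.enumerate, vdLoopA]
    | cons c rest =>
      have hc : c ≠ "-" := by
        intro h; exact hhead (by simp [h])
      rw [PySem.List.enumerate_cons]
      have h1 : vdLoopA ((0, c) :: PySem.List.enumerate rest (0 + 1)) 0
          = vdLoopA (PySem.List.enumerate rest 1) 0 := by
        simp [vdLoopA, hc]
      rw [h1, vdLoopA_run rest 1 0 le_rfl le_rfl
          (fun _ => by simpa [List.dropWhile, hc] using hsuf)
          (fun h => absurd rfl h)]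
      rw [List.count_cons_of_ne (by simpa using hc)]
      omega
  rw [hA]
  unfold validate_dashes_alt
  rw [PySem.List.count_eq]
  by_cases hz : (t.count "-" : Int) = 0
  · simp [hz]
  · obtain ⟨hdec, htake⟩ := pre_decomp t hsuf
    have hzn : t.count "-" ≠ 0 := by exact_mod_cast hz
    -- first element is not "-"
    have hget : PySem.List.pyGet? t 0 ≠ some "-" := by
      cases t with
      | nil => simp at hzn
      | cons c rest =>
        have hc : c ≠ "-" := fun h => hhead (by simp [h])
        simp [PySem.List.pyGet?, PySem.List.pyIdx?, hc]
    -- the slice equals the replicate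
    have hlen : t.length = (t.takeWhile (fun s => s ≠ "-")).length + t.count "-" := by
      conv_lhs => rw [hdec]
      rw [List.length_append, List.length_replicate]
    have hslice : PySem.List.slice t (some ((t.length : Int) - (t.count "-" : Int))) none
        = List.replicate ((t.count "-" : Int)).toNat "-" := by
      have h2 : (t.length : Int) - (t.count "-" : Int) = ((t.takeWhile (fun s => s ≠ "-")).length : Int) := by
        rw [hlen]; push_cast; ring
      rw [h2, PySem.List.slice_from_natCast, Int.toNat_natCast]
      have hdl := List.drop_left (l₁ := t.takeWhile (fun s => s ≠ "-")) (l₂ := List.replicate (t.count "-") "-")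
      rw [← hdec] at hdl
      exact hdl
    simp only [hz, hget, hslice]
    simp
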